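-- pv_equiv track=rewrite | github.com/hydra-genetics/biomarker | workflow/scripts/hrd.py | filter_merge_segments
-- ===== SOURCE A (Python) =====
-- def filter_merge_segments(segments, min_size):
--     filtered_merged_segments = {}
--     for chrom in segments:
--         filtered_merged_segments[chrom] = []
--         prev_segment = []
--         for segment in segments[chrom]:
--             if segment["nr_exons"] <= 1 or segment["nr_probes"] < 20 or segment["length"] < min_size:
--                 continue
--             if prev_segment != []:
--                 # if prev_segment["cn"] == segment["cn"]:
--                 if (
--                     (prev_segment["cn"] > 2 and segment["cn"] > 2) or
--                     (prev_segment["cn"] < 2 and segment["cn"] < 2) or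
--                     (prev_segment["cn"] == 2 and segment["cn"] == 2)
--                 ):
--                     prev_segment["end_pos"] = segment["end_pos"]
--                     prev_segment["length"] = prev_segment["end_pos"] - prev_segment["start_pos"] + 1
--                 else:
--                     filtered_merged_segments[chrom].append(prev_segment)
--                     prev_segment = {
--                         "start_pos": segment["start_pos"], "end_pos": segment["end_pos"],
--                         "cn": segment["cn"], "cn1": segment["cn1"], "cn2": segment["cn2"], "length": segment["length"]
--                     }
--             else:
--                 prev_segment = {
--                     "start_pos": segment["start_pos"], "end_pos": segment["end_pos"],
--                     "cn": segment["cn"], "cn1": segment["cn1"], "cn2": segment["cn2"], "length": segment["length"]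
--                 }
--         if prev_segment != []:
--             filtered_merged_segments[chrom].append(prev_segment)
--     return filtered_merged_segments
-- ===== SOURCE B (Python) =====
-- def filter_merge_segments(segments, min_size):
--     def cat(cn):
--         if cn > 2:
--             return 1
--         if cn < 2:
--             return -1
--         return 0
--
--     def merge_runs(kept):
--         if not kept:
--             return []
--         first = kept[0]
--         tail = kept[1:]
--         c = cat(first["cn"])
--         i = 0
--         while i < len(tail) and cat(tail[i]["cn"]) == c:
--             i += 1
--         run_tail, rest = tail[:i], tail[i:]
--         last = run_tail[-1] if run_tail else first
--         length = first["length"] if not run_tail else last["end_pos"] - first["start_pos"] + 1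
--         seg = {
--             "start_pos": first["start_pos"], "end_pos": last["end_pos"],
--             "cn": first["cn"], "cn1": first["cn1"], "cn2": first["cn2"], "length": length,
--         }
--         return [seg] + merge_runs(rest)
--
--     result = {}
--     for chrom in segments:
--         kept = [s for s in segments[chrom]
--                 if s["nr_exons"] > 1 and s["nr_probes"] >= 20 and s["length"] >= min_size]
--         result[chrom] = merge_runs(kept)
--     return result
-- ===== Notes on version B (the rewrite author's own statement) =====
-- stated objective: simpler
-- what changed: A threads a mutable prev_segment through the loop, merging in place and appending on category change; B filters each chromosome's segments first and then recursively peels maximal runs of equal copy-number category, emitting one merged segment per run.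
import Mathlib
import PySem

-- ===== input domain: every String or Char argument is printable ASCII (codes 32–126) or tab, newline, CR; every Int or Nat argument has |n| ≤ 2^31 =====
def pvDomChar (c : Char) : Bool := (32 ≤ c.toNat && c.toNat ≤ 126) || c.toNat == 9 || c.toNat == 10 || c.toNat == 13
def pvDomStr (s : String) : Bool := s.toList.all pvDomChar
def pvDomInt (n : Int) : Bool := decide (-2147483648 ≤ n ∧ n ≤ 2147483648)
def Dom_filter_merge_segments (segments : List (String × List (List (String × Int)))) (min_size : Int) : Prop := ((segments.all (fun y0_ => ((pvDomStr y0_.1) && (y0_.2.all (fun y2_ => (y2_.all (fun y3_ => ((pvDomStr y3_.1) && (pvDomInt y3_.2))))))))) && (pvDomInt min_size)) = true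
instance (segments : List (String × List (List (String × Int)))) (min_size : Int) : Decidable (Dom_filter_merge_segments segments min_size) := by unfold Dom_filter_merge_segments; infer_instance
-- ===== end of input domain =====

-- B replaces A's in-place prev_segment/append machinery with a filter pass followed by a
-- recursive grouping of maximal same-category runs (objective: simpler decomposition, same cost).

-- s[k] with default 0; under Pre_ every key actually read is present, so the default is
-- never the value used (Python raises KeyError exactly outside Pre_)
def pvGetI (s : List (String × Int)) (k : String) : Int :=
  ((PySem.Dict.mk s).get? k).getD 0

def pvHasK (s : List (String × Int)) (k : String) : Prop :=
  ((PySem.Dict.mk s).get? k).isSome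

-- ===== PORT A =====
-- the dict literal A builds for a fresh prev_segment
def pvMkSegA (s : List (String × Int)) : List (String × Int) :=
  [("start_pos", pvGetI s "start_pos"), ("end_pos", pvGetI s "end_pos"),
   ("cn", pvGetI s "cn"), ("cn1", pvGetI s "cn1"), ("cn2", pvGetI s "cn2"),
   ("length", pvGetI s "length")]

-- A's inner loop body; state = (list appended so far, prev_segment; [] = Python's [])
def pvStepA (min_size : Int) (st : List (List (String × Int)) × List (String × Int))
    (segment : List (String × Int)) : List (List (String × Int)) × List (String × Int) :=
  if pvGetI segment "nr_exons" ≤ 1 ∨ pvGetI segment "nr_probes" < 20 ∨ pvGetI segment "length" < min_size then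
    st
  else if st.2 ≠ [] then
    if (pvGetI st.2 "cn" > 2 ∧ pvGetI segment "cn" > 2) ∨
       (pvGetI st.2 "cn" < 2 ∧ pvGetI segment "cn" < 2) ∨
       (pvGetI st.2 "cn" = 2 ∧ pvGetI segment "cn" = 2) then
      let p1 := ((PySem.Dict.mk st.2).insert "end_pos" (pvGetI segment "end_pos")).items
      let p2 := ((PySem.Dict.mk p1).insert "length" (pvGetI p1 "end_pos" - pvGetI p1 "start_pos" + 1)).items
      (st.1, p2)
    else
      (st.1 ++ [st.2], pvMkSegA segment)
  else
    (st.1, pvMkSegA segment)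

def filter_merge_segments (segments : List (String × List (List (String × Int)))) (min_size : Int) : List (String × List (List (String × Int))) :=
  (segments.foldl (fun acc ch =>
    -- filtered_merged_segments[chrom] = [] creates the entry; the loop appends into it and the
    -- trailing 'if' appends the last prev_segment: the appends are threaded through (list, prev)
    let acc1 := acc.insert ch.1 []
    let inner := ((PySem.Dict.mk segments).get? ch.1).getD []
    let st := inner.foldl (pvStepA min_size) ([], [])
    acc1.insert ch.1 (if st.2 ≠ [] then st.1 ++ [st.2] else st.1))
    PySem.Dict.empty).items

-- ===== PORT B =====
def pvCat (cn : Int) : Int := if cn > 2 then 1 else if cn < 2 then -1 else 0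

def pvKeep (min_size : Int) (s : List (String × Int)) : Bool :=
  decide (1 < pvGetI s "nr_exons") && decide (20 ≤ pvGetI s "nr_probes") && decide (min_size ≤ pvGetI s "length")

def pvOutSeg (first last : List (String × Int)) (len : Int) : List (String × Int) :=
  [("start_pos", pvGetI first "start_pos"), ("end_pos", pvGetI last "end_pos"),
   ("cn", pvGetI first "cn"), ("cn1", pvGetI first "cn1"), ("cn2", pvGetI first "cn2"),
   ("length", len)]

-- merge_runs: peel the maximal run of the head's category, emit one segment, recurse on the rest
def pvMergeRuns : List (List (String × Int)) → List (List (String × Int))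
  | [] => []
  | first :: tail =>
    let c := pvCat (pvGetI first "cn")
    let run_tail := tail.takeWhile (fun s => pvCat (pvGetI s "cn") == c)
    let rest := tail.dropWhile (fun s => pvCat (pvGetI s "cn") == c)
    let last := run_tail.getLast?.getD first
    let len := if run_tail.isEmpty then pvGetI first "length"
               else pvGetI last "end_pos" - pvGetI first "start_pos" + 1
    pvOutSeg first last len :: pvMergeRuns rest
termination_by l => l.length
decreasing_by
  simpa using Nat.lt_succ_of_le (List.length_dropWhile_le _ tail)

def filter_merge_segments_alt (segments : List (String × List (List (String × Int)))) (min_size : Int) : List (String × List (List (String × Int))) :=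
  (segments.foldl (fun acc ch =>
    let kept := (((PySem.Dict.mk segments).get? ch.1).getD []).filter (pvKeep min_size)
    acc.insert ch.1 (pvMergeRuns kept))
    PySem.Dict.empty).items

-- ===== PRECONDITION & SPEC =====
-- Pre_ excludes exactly the inputs where A raises KeyError: a segment missing a key A actually
-- reads (short-circuit: later filter keys are read only if the earlier tests pass, the merge
-- keys only if the segment is kept).
def pvSegOK (min_size : Int) (s : List (String × Int)) : Prop :=
  pvHasK s "nr_exons" ∧
  (1 < pvGetI s "nr_exons" →
    pvHasK s "nr_probes" ∧
    (20 ≤ pvGetI s "nr_probes" →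
      pvHasK s "length" ∧
      (min_size ≤ pvGetI s "length" →
        pvHasK s "start_pos" ∧ pvHasK s "end_pos" ∧ pvHasK s "cn" ∧
        pvHasK s "cn1" ∧ pvHasK s "cn2")))

def Pre_filter_merge_segments (segments : List (String × List (List (String × Int)))) (min_size : Int) : Prop :=
  ∀ ch ∈ segments, ∀ s ∈ ((PySem.Dict.mk segments).get? ch.1).getD [], pvSegOK min_size s

instance (segments : List (String × List (List (String × Int)))) (min_size : Int) : Decidable (Pre_filter_merge_segments segments min_size) := by
  unfold Pre_filter_merge_segments pvSegOK pvHasK; infer_instance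

def pvWitness_filter_merge_segments : (List (String × List (List (String × Int)))) × Int :=
  ([("chr1", [[("nr_exons", 2), ("nr_probes", 20), ("length", 5), ("start_pos", 1),
               ("end_pos", 5), ("cn", 2), ("cn1", 1), ("cn2", 1)]])], 1)

def Spec_filter_merge_segments (segments : List (String × List (List (String × Int)))) (min_size : Int) (out : List (String × List (List (String × Int)))) : Prop := out = filter_merge_segments_alt segments min_size
instance (segments : List (String × List (List (String × Int)))) (min_size : Int) (out : List (String × List (List (String × Int)))) : Decidable (Spec_filter_merge_segments segments min_size out) := by unfold Spec_filter_merge_segments; infer_instance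

-- ===== CLAIM (what is proved, stated in full; the proofs are below) =====
def Claim_equal_filter_merge_segments : Prop := ∀ (segments : List (String × List (List (String × Int)))) (min_size : Int), Dom_filter_merge_segments segments min_size → Pre_filter_merge_segments segments min_size → Spec_filter_merge_segments segments min_size (filter_merge_segments segments min_size)

-- ===== LEMMAS AND PROOFS =====

-- the shape prev_segment always has: built from the run's first segment, with end_pos from the
-- run's last segment and length recomputed iff at least one merge has happened
def pvPSeg (f la : List (String × Int)) (m : Bool) : List (String × Int) :=
  pvOutSeg f la (if m then pvGetI la "end_pos" - pvGetI f "start_pos" + 1 else pvGetI f "length")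

-- A's post-filter loop, rephrased on (first, last, merged) run state
def pvGo : List (List (String × Int)) → List (String × Int) → List (String × Int) → Bool → List (List (String × Int))
  | [], f, la, m => [pvPSeg f la m]
  | s :: t, f, la, m =>
    if pvCat (pvGetI s "cn") = pvCat (pvGetI f "cn") then pvGo t f s true
    else pvPSeg f la m :: pvGo t s s false

lemma pvCat_iff (a b : Int) :
    ((a > 2 ∧ b > 2) ∨ (a < 2 ∧ b < 2) ∨ (a = 2 ∧ b = 2)) ↔ pvCat b = pvCat a := by
  unfold pvCat
  split_ifs <;> (try simp only [iff_false, iff_true]) <;> omega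

lemma pvPSeg_ne_nil (f la : List (String × Int)) (m : Bool) : pvPSeg f la m ≠ [] := by
  simp [pvPSeg, pvOutSeg]

lemma pvPSeg_cn (f la : List (String × Int)) (m : Bool) :
    pvGetI (pvPSeg f la m) "cn" = pvGetI f "cn" := rfl

lemma pvMkSegA_eq (s : List (String × Int)) : pvMkSegA s = pvPSeg s s false := rfl

-- the two overwriting inserts of a merge step turn pvPSeg f la m into pvPSeg f s true
lemma pvMerge_insert (f la s : List (String × Int)) (m : Bool) :
    (let p1 := ((PySem.Dict.mk (pvPSeg f la m)).insert "end_pos" (pvGetI s "end_pos")).items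
     ((PySem.Dict.mk p1).insert "length" (pvGetI p1 "end_pos" - pvGetI p1 "start_pos" + 1)).items)
    = pvPSeg f s true := by
  cases m <;> rfl

-- A's step on a kept segment (the else-branch of pvStepA)
def pvStepA' (st : List (List (String × Int)) × List (String × Int))
    (segment : List (String × Int)) : List (List (String × Int)) × List (String × Int) :=
  if st.2 ≠ [] then
    if (pvGetI st.2 "cn" > 2 ∧ pvGetI segment "cn" > 2) ∨
       (pvGetI st.2 "cn" < 2 ∧ pvGetI segment "cn" < 2) ∨
       (pvGetI st.2 "cn" = 2 ∧ pvGetI segment "cn" = 2) then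
      let p1 := ((PySem.Dict.mk st.2).insert "end_pos" (pvGetI segment "end_pos")).items
      let p2 := ((PySem.Dict.mk p1).insert "length" (pvGetI p1 "end_pos" - pvGetI p1 "start_pos" + 1)).items
      (st.1, p2)
    else
      (st.1 ++ [st.2], pvMkSegA segment)
  else
    (st.1, pvMkSegA segment)

lemma pvStepA_eq_ite (min_size : Int) (st : List (List (String × Int)) × List (String × Int))
    (s : List (String × Int)) :
    pvStepA min_size st s = if pvKeep min_size s then pvStepA' st s else st := by
  by_cases h : pvGetI s "nr_exons" ≤ 1 ∨ pvGetI s "nr_probes" < 20 ∨ pvGetI s "length" < min_size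
  · have hk : pvKeep min_size s = false := by
      simp only [pvKeep, Bool.and_eq_false_iff, decide_eq_false_iff_not]
      omega
    rw [hk]
    unfold pvStepA
    rw [if_pos h]
    simp
  · have hk : pvKeep min_size s = true := by
      simp only [pvKeep, Bool.and_eq_true, decide_eq_true_eq]
      omega
    rw [hk, if_pos rfl]
    unfold pvStepA pvStepA'
    rw [if_neg h]

-- filtering first is the same as skipping inside the loop
lemma pvFoldA_filter (min_size : Int) (l : List (List (String × Int)))
    (st : List (List (String × Int)) × List (String × Int)) :
    l.foldl (pvStepA min_size) st = (l.filter (pvKeep min_size)).foldl pvStepA' st := by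
  rw [List.foldl_filter]
  exact PySem.List.foldl_congr_mem _ _ _ _ (fun acc s _ => pvStepA_eq_ite min_size acc s)

def pvFlush (st : List (List (String × Int)) × List (String × Int)) : List (List (String × Int)) :=
  if st.2 ≠ [] then st.1 ++ [st.2] else st.1

-- loop invariant: with prev_segment = pvPSeg f la m, A's loop-and-flush emits out ++ pvGo l f la m
lemma pvFoldA'_go (l : List (List (String × Int))) :
    ∀ (out : List (List (String × Int))) (f la : List (String × Int)) (m : Bool),
    pvFlush (l.foldl pvStepA' (out, pvPSeg f la m)) = out ++ pvGo l f la m := by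
  induction l with
  | nil =>
    intro out f la m
    simp [pvFlush, pvGo, pvPSeg_ne_nil]
  | cons s t ih =>
    intro out f la m
    have hne : pvPSeg f la m ≠ [] := pvPSeg_ne_nil f la m
    by_cases hc : pvCat (pvGetI s "cn") = pvCat (pvGetI f "cn")
    · have hstep : pvStepA' (out, pvPSeg f la m) s = (out, pvPSeg f s true) := by
        unfold pvStepA'
        rw [if_pos (by simpa using hne),
            if_pos (by simpa only [pvPSeg_cn] using (pvCat_iff (pvGetI f "cn") (pvGetI s "cn")).mpr hc)]
        simpa using pvMerge_insert f la s m
      simp only [List.foldl_cons, hstep, ih, pvGo, if_pos hc]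
    · have hstep : pvStepA' (out, pvPSeg f la m) s = (out ++ [pvPSeg f la m], pvPSeg s s false) := by
        unfold pvStepA'
        rw [if_pos (by simpa using hne),
            if_neg (by simpa only [pvPSeg_cn] using
              fun h => hc ((pvCat_iff (pvGetI f "cn") (pvGetI s "cn")).mp h))]
        rw [pvMkSegA_eq]
      simp only [List.foldl_cons, hstep, ih, pvGo, if_neg hc, List.append_assoc, List.cons_append,
        List.nil_append]

lemma pvGetLast?_getD_cons {α : Type} (a d : α) (l : List α) :
    ((a :: l).getLast?.getD d) = l.getLast?.getD a := by
  cases l with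
  | nil => rfl
  | cons b t =>
    rw [List.getLast?_cons_cons]
    cases h : (b :: t).getLast? with
    | none => simp at h
    | some x => simp

-- pvGo emits exactly B's runs
lemma pvGo_eq_mergeRuns (l : List (List (String × Int))) :
    ∀ (f la : List (String × Int)) (m : Bool),
    pvGo l f la m =
      pvPSeg f ((l.takeWhile (fun s => pvCat (pvGetI s "cn") == pvCat (pvGetI f "cn"))).getLast?.getD la)
        (m || !(l.takeWhile (fun s => pvCat (pvGetI s "cn") == pvCat (pvGetI f "cn"))).isEmpty)
      :: pvMergeRuns (l.dropWhile (fun s => pvCat (pvGetI s "cn") == pvCat (pvGetI f "cn"))) := by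
  induction l with
  | nil => intro f la m; simp [pvGo, pvMergeRuns]
  | cons s t ih =>
    intro f la m
    by_cases hc : pvCat (pvGetI s "cn") = pvCat (pvGetI f "cn")
    · have hP : (pvCat (pvGetI s "cn") == pvCat (pvGetI f "cn")) = true := beq_iff_eq.mpr hc
      simp only [List.takeWhile_cons, List.dropWhile_cons, hP, if_true,
        pvGo, if_pos hc, ih f s true, pvGetLast?_getD_cons, List.isEmpty_cons]
      simp
    · have hP : (pvCat (pvGetI s "cn") == pvCat (pvGetI f "cn")) = false :=
        beq_eq_false_iff_ne.mpr hc
      simp only [List.takeWhile_cons, List.dropWhile_cons, hP, Bool.false_eq_true, if_false,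
        pvGo, if_neg hc, List.getLast?_nil, Option.getD_none, List.isEmpty_nil,
        Bool.not_true, Bool.or_false]
      rw [ih s s false]
      conv_rhs => rw [pvMergeRuns]
      simp only [Bool.false_or]
      congr 1
      unfold pvPSeg
      cases hE : (t.takeWhile (fun x => pvCat (pvGetI x "cn") == pvCat (pvGetI s "cn"))).isEmpty <;>
        simp_all

-- per-chromosome equality
lemma pvChrom_eq (min_size : Int) (l : List (List (String × Int))) :
    pvFlush (l.foldl (pvStepA min_size) ([], [])) = pvMergeRuns (l.filter (pvKeep min_size)) := by
  rw [pvFoldA_filter]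
  cases hk : l.filter (pvKeep min_size) with
  | nil => simp [pvFlush, pvMergeRuns]
  | cons s t =>
    have h1 : pvStepA' (([] : List (List (String × Int))), ([] : List (String × Int))) s
        = ([], pvPSeg s s false) := by
      unfold pvStepA'; rw [if_neg (by simp)]; rw [pvMkSegA_eq]
    rw [List.foldl_cons, h1, pvFoldA'_go, pvGo_eq_mergeRuns]
    conv_rhs => rw [pvMergeRuns]
    simp only [List.nil_append, Bool.false_or]
    congr 1
    unfold pvPSeg
    cases hE : (t.takeWhile (fun x => pvCat (pvGetI x "cn") == pvCat (pvGetI s "cn"))).isEmpty <;>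
      simp_all

-- overwriting the same key twice is one insert
lemma pvInsert_insert_self (d : PySem.Dict String (List (List (String × Int))))
    (k : String) (v w : List (List (String × Int))) :
    (d.insert k v).insert k w = d.insert k w := by
  unfold PySem.Dict.insert PySem.Dict.contains
  cases hd : d.items.any (fun p => p.1 == k) with
  | true =>
    have h1 : (List.map (fun p => if (p.1 == k) = true then (k, v) else p) d.items).any
        (fun p => p.1 == k) = true := by
      rw [List.any_eq_true] at hd ⊢
      obtain ⟨p, hp, hpk⟩ := hd
      exact ⟨if (p.1 == k) = true then (k, v) else p, List.mem_map_of_mem hp, by simp [hpk]⟩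
    simp only [h1, if_pos, List.map_map]
    congr 1
    refine List.map_congr_left fun p _ => ?_
    by_cases h : p.1 = k <;> simp [h]
  | false =>
    have h1 : (d.items ++ [(k, v)]).any (fun p => p.1 == k) = true := by simp
    simp only [Bool.false_eq_true, if_neg, not_false_iff, h1, if_pos, List.map_append]
    congr 1
    · have hid : ∀ p ∈ d.items, (fun p : String × List (List (String × Int)) =>
          if (p.1 == k) = true then (k, w) else p) p = p := by
        intro p hp
        have : ¬ (p.1 == k) = true := by
          rw [List.any_eq_false] at hd; exact hd p hp
        simp [this]
      rw [List.map_congr_left hid]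
      simp

-- ===== VERDICT (by name: the statement is the Claim_ definition above) =====
theorem filter_merge_segments_spec : Claim_equal_filter_merge_segments := by
  intro segments min_size _ _
  unfold Spec_filter_merge_segments filter_merge_segments filter_merge_segments_alt
  congr 1
  apply PySem.List.foldl_congr_mem
  intro acc ch _
  rw [pvInsert_insert_self]
  congr 1
  exact pvChrom_eq min_size _
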